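-- pv_equiv track=rewrite | github.com/ryanoneill/python3-leetcode | zero_array_transformation_ii.py | becomes_zero_array
-- ===== SOURCE A (Python) =====
-- from typing import List
--
-- def becomes_zero_array(nums: List[int], queries: List[List[int]], k: int) -> bool:
--     result = True
--
--     n = len(nums)
--     sum = 0
--     diffs = [0] * (n + 1)
--
--     for i in range(k):
--         left, right, value = queries[i]
--         diffs[left] += value
--         diffs[right+1] -= value
--
--     for i in range(n):
--         sum += diffs[i]
--         if sum < nums[i]:
--             result = False
--             break
--
--     return result
-- ===== SOURCE B (Python) =====
-- from typing import List
--
-- def becomes_zero_array(nums: List[int], queries: List[List[int]], k: int) -> bool: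
--     qs = queries[:k] if k > 0 else []
--     for i, x in enumerate(nums):
--         if sum(v for l, r, v in qs if l <= i <= r) < x:
--             return False
--     return True
-- ===== Notes on version B (the rewrite author's own statement) =====
-- stated objective: simpler
-- what changed: Replaces the mutable difference array and prefix-sum scan with a direct per-index covering sum: for each index i it sums the values of the first k queries whose interval [l,r] contains i and compares against nums[i].
-- outside the precondition, e.g. on becomes_zero_array([0, 0], [[2, 0, 5]], 1): A returns False, B returns True; on becomes_zero_array([0], [[-1, -1, 5]], 1): A returns False, B returns True
import Mathlib
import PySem

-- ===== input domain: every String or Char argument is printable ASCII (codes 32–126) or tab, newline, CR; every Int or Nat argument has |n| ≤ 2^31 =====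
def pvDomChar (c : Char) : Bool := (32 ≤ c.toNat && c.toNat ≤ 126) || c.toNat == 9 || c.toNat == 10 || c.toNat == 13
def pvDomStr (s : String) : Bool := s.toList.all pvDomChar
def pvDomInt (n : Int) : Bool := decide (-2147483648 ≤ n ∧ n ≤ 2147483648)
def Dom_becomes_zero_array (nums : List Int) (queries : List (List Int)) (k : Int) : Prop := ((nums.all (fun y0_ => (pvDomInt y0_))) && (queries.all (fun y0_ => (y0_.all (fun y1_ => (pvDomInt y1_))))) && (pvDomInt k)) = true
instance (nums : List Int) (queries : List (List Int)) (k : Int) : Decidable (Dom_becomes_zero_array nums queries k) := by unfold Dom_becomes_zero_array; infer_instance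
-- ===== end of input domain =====

-- B replaces A's difference array + prefix-sum scan by a direct per-index covering sum
-- over the first k queries (objective: simpler).

-- ===== PORT A =====
-- body of A's first loop after 'left, right, value = queries[i]': the two difference-array updates
def pvApplyQ (diffs : List Int) (q : List Int) : List Int :=
  match q with
  | [l, r, v] =>
      let d1 := PySem.List.pySetD diffs l (PySem.List.pyGetD diffs l 0 + v)
      PySem.List.pySetD d1 (r + 1) (PySem.List.pyGetD d1 (r + 1) 0 - v)
  | _ => diffs   -- Python raises ValueError on unpacking; outside Pre_

-- A's second loop: running sum over diffs, break (return False) at the first failing index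
def pvScanA : List Int → List Int → Int → Bool
  | [], _, _ => true
  | _ :: _, [], _ => true   -- unreachable: diffs is longer than nums
  | x :: xs, d :: ds, s => if s + d < x then false else pvScanA xs ds (s + d)

def becomes_zero_array (nums : List Int) (queries : List (List Int)) (k : Int) : Bool :=
  let n := nums.length
  let diffs := (PySem.List.pyRange 0 k 1).foldl
      (fun d i =>
        match PySem.List.pyGet? queries i with
        | some q => pvApplyQ d q
        | none => d)   -- Python raises IndexError; outside Pre_
      (List.replicate (n + 1) (0 : Int))
  pvScanA nums diffs 0

-- ===== PORT B =====
-- sum(v for l, r, v in qs if l <= i <= r)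
def pvCover (qs : List (List Int)) (i : Int) : Int :=
  qs.foldl (fun s q =>
    match q with
    | [l, r, v] => if l ≤ i ∧ i ≤ r then s + v else s
    | _ => s) 0   -- Python raises ValueError on unpacking; outside Pre_

-- for i, x in enumerate(nums): early return False
def pvLoopB (qs : List (List Int)) : List Int → Int → Bool
  | [], _ => true
  | x :: xs, i => if pvCover qs i < x then false else pvLoopB qs xs (i + 1)

def becomes_zero_array_alt (nums : List Int) (queries : List (List Int)) (k : Int) : Bool :=
  let qs := if 0 < k then PySem.List.slice queries none (some k) else []
  pvLoopB qs nums 0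

-- ===== PRECONDITION & SPEC =====
-- Pre_ excludes (a) inputs where A raises (k > len(queries), a query among the first k that is not a
-- length-3 triple, or an endpoint outside the difference array's index range), and (b) inputs A returns
-- on whose first-k queries are degenerate — a negative left endpoint (Python's negative-index wraparound
-- into the difference array) or left > right + 1 (an inverted interval that leaks a negative residue
-- into the difference array) — corners where B's empty-interval reading is as defensible as A's value.
def Pre_becomes_zero_array (nums : List Int) (queries : List (List Int)) (k : Int) : Prop :=
  k ≤ (queries.length : Int) ∧
  ∀ q ∈ queries.take k.toNat,
    q.length = 3 ∧ 0 ≤ q.getD 0 0 ∧ q.getD 0 0 ≤ q.getD 1 0 + 1 ∧ q.getD 1 0 < (nums.length : Int)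
instance (nums : List Int) (queries : List (List Int)) (k : Int) : Decidable (Pre_becomes_zero_array nums queries k) := by unfold Pre_becomes_zero_array; infer_instance

def pvWitness_becomes_zero_array : List Int × List (List Int) × Int := ([1, 2], [[0, 1, 3]], 1)

def Spec_becomes_zero_array (nums : List Int) (queries : List (List Int)) (k : Int) (out : Bool) : Prop := out = becomes_zero_array_alt nums queries k
instance (nums : List Int) (queries : List (List Int)) (k : Int) (out : Bool) : Decidable (Spec_becomes_zero_array nums queries k out) := by unfold Spec_becomes_zero_array; infer_instance

-- ===== CLAIM (what is proved, stated in full; the proofs are below) =====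
def Claim_equal_becomes_zero_array : Prop := ∀ (nums : List Int) (queries : List (List Int)) (k : Int), Dom_becomes_zero_array nums queries k → Pre_becomes_zero_array nums queries k → Spec_becomes_zero_array nums queries k (becomes_zero_array nums queries k)

-- ===== LEMMAS AND PROOFS =====

-- setting one cell changes a take-prefix sum by (new - old) when the cell lies in the prefix
theorem pv_set_take_sum (d : List Int) (pn : Nat) (w : Int) (m : Nat) (h : pn < d.length) :
    ((d.set pn w).take m).sum = (d.take m).sum + (if pn < m then w - d[pn] else 0) := by
  by_cases hm : pn < m
  · have ht : pn < (d.take m).length := by rw [List.length_take]; omega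
    have h1 := List.sum_set (d.take m) pn w
    have h2 := List.sum_set (d.take m) pn ((d.take m)[pn])
    rw [List.set_getElem_self] at h2
    rw [List.take_set, h1, if_pos ht, if_pos hm]
    rw [List.getElem_take] at h2
    omega
  · have hle : (d.take m).length <= pn := by rw [List.length_take]; omega
    rw [List.take_set, List.set_eq_of_length_le hle, if_neg hm, add_zero]

theorem pv_applyQ_length (d : List Int) (q : List Int) : (pvApplyQ d q).length = d.length := by
  unfold pvApplyQ
  match q with
  | [l, r, v] => simp [PySem.List.length_pySetD]
  | [] => rfl
  | [_] => rfl
  | [_, _] => rfl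
  | _ :: _ :: _ :: _ :: _ => rfl

-- one difference-array update changes the prefix sum by +v at indices >= l and -v at indices >= r+1
theorem pv_applyQ_take_sum (d : List Int) (l r v : Int) (m : Nat)
    (h0 : 0 <= l) (hlr : l <= r + 1) (hr : r + 1 < (d.length : Int)) :
    ((pvApplyQ d [l, r, v]).take m).sum
      = (d.take m).sum + (if l.toNat < m then v else 0) + (if (r + 1).toNat < m then -v else 0) := by
  have hln : l.toNat < d.length := by omega
  have hrn : (r + 1).toNat < d.length := by omega
  have hset : pvApplyQ d [l, r, v]
      = (d.set l.toNat (d[l.toNat] + v)).set (r + 1).toNat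
          ((d.set l.toNat (d[l.toNat] + v))[(r + 1).toNat]'(by simpa using hrn) - v) := by
    show (PySem.List.pySetD (PySem.List.pySetD d l (PySem.List.pyGetD d l 0 + v)) (r + 1)
      (PySem.List.pyGetD (PySem.List.pySetD d l (PySem.List.pyGetD d l 0 + v)) (r + 1) 0 - v)) = _
    rw [PySem.List.pyGetD_eq_getElem d 0 h0 (by omega)]
    rw [PySem.List.pySetD_of_nonneg d _ h0]
    rw [PySem.List.pyGetD_eq_getElem _ 0 (by omega) (by simp; omega)]
    rw [PySem.List.pySetD_of_nonneg _ _ (by omega)]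
  rw [hset, pv_set_take_sum _ _ _ _ (by simpa using hrn), pv_set_take_sum _ _ _ _ hln]
  split_ifs <;> ring

-- A's first loop over range(k) is a fold of pvApplyQ over the first m = k.toNat queries
theorem pv_fold_take (queries : List (List Int)) (m : Nat) (hm : m <= queries.length)
    (d : List Int) :
    (PySem.List.pyRange 0 (m : Int) 1).foldl
        (fun d i =>
          match PySem.List.pyGet? queries i with
          | some q => pvApplyQ d q
          | none => d) d
      = (queries.take m).foldl pvApplyQ d := by
  induction m generalizing d with
  | zero => simp [PySem.List.pyRange]
  | succ m ih =>
      have hm' : m <= queries.length := by omega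
      have hq : queries[m]? = some queries[m] := List.getElem?_eq_getElem (by omega)
      have hcast : ((m + 1 : Nat) : Int) = (m : Int) + 1 := by push_cast; ring
      rw [hcast, PySem.List.pyRange_one_succ_right (by positivity), List.foldl_append,
        ih hm', List.take_add_one, List.foldl_append]
      simp [PySem.List.pyGet?_natCast, hq]

-- the covering contribution of one query to index i
def pvContrib (i : Int) (q : List Int) : Int :=
  match q with
  | [l, r, v] => if l <= i ∧ i <= r then v else 0
  | _ => 0

theorem pv_cover_aux (i : Int) (qs : List (List Int)) : ∀ a : Int,
    qs.foldl (fun s q =>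
      match q with
      | [l, r, v] => if l <= i ∧ i <= r then s + v else s
      | _ => s) a = a + (qs.map (pvContrib i)).sum := by
  induction qs with
  | nil => intro a; simp
  | cons q qs ih =>
      intro a
      rw [List.foldl_cons, ih, List.map_cons, List.sum_cons]
      match q with
      | [l, r, v] => simp only [pvContrib]; split_ifs <;> ring
      | [] => simp [pvContrib]
      | [_] => simp [pvContrib]
      | [_, _] => simp [pvContrib]
      | _ :: _ :: _ :: _ :: _ => simp [pvContrib]

theorem pv_cover_eq_sum (qs : List (List Int)) (i : Int) :
    pvCover qs i = (qs.map (pvContrib i)).sum := by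
  unfold pvCover
  rw [pv_cover_aux]
  ring

theorem pv_cover_cons (q : List Int) (qs : List (List Int)) (i : Int) :
    pvCover (q :: qs) i = pvContrib i q + pvCover qs i := by
  rw [pv_cover_eq_sum, pv_cover_eq_sum, List.map_cons, List.sum_cons]

-- prefix sums of the difference array equal the per-index covering sums
theorem pv_prefix_eq_cover (n : Nat) (qs : List (List Int)) (d : List Int)
    (hd : d.length = n + 1)
    (hq : ∀ q ∈ qs, q.length = 3 ∧ 0 <= q.getD 0 0 ∧ q.getD 0 0 <= q.getD 1 0 + 1 ∧
            q.getD 1 0 < (n : Int))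
    (j : Nat) (_hj : j < n) :
    ((qs.foldl pvApplyQ d).take (j + 1)).sum = (d.take (j + 1)).sum + pvCover qs (j : Int) := by
  induction qs generalizing d with
  | nil => simp [pvCover]
  | cons q qs ih =>
      obtain ⟨hq1, hq2, hq3, hq4⟩ := hq q (by simp)
      match q, hq1 with
      | [l, r, v], _ =>
        simp [List.getD] at hq2 hq3 hq4
        rw [List.foldl_cons,
          ih _ (by rw [pv_applyQ_length]; exact hd) (fun q hq' => hq q (by simp [hq'])),
          pv_applyQ_take_sum d l r v (j + 1) hq2 hq3 (by rw [hd]; push_cast; omega),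
          pv_cover_cons]
        simp only [pvContrib]
        split_ifs <;> omega

theorem pv_foldl_length (qs : List (List Int)) (d : List Int) :
    (qs.foldl pvApplyQ d).length = d.length := by
  induction qs generalizing d with
  | nil => rfl
  | cons q qs ih => rw [List.foldl_cons, ih, pv_applyQ_length]

-- A's break-scan equals B's loop when the running prefix sums agree with the covering sums
theorem pv_scan_eq (qs : List (List Int)) (xs : List Int) :
    ∀ (ds : List Int) (i s : Int), xs.length <= ds.length →
    (∀ j : Nat, j < xs.length → s + (ds.take (j + 1)).sum = pvCover qs (i + (j : Int))) →
    pvScanA xs ds s = pvLoopB qs xs i := by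
  induction xs with
  | nil => intro ds i s _ _; cases ds <;> rfl
  | cons x xs ih =>
      intro ds i s hlen hsum
      match ds with
      | [] => simp at hlen
      | d :: ds =>
        have h0 := hsum 0 (by simp)
        simp at h0
        show (if s + d < x then false else pvScanA xs ds (s + d)) = _
        rw [pvLoopB, ← h0]
        by_cases hc : s + d < x
        · rw [if_pos hc, if_pos hc]
        · rw [if_neg hc, if_neg hc]
          apply ih ds (i + 1) (s + d) (by simpa using hlen)
          intro j hj
          have h := hsum (j + 1) (by simpa using hj)
          rw [List.take_succ_cons, List.sum_cons] at h
          have hcast : i + ((j + 1 : Nat) : Int) = i + 1 + (j : Int) := by push_cast; ring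
          rw [hcast] at h
          linarith [h]

-- ===== VERDICT (by name: the statement is the Claim_ definition above) =====
theorem becomes_zero_array_spec : Claim_equal_becomes_zero_array := by
  intro nums queries k _ hpre
  obtain ⟨hk, hq⟩ := hpre
  unfold Spec_becomes_zero_array becomes_zero_array becomes_zero_array_alt
  dsimp only
  have hqs : (if 0 < k then PySem.List.slice queries none (some k) else [])
      = queries.take k.toNat := by
    by_cases h : 0 < k
    · rw [if_pos h, PySem.List.slice_to queries (le_of_lt h)]
    · rw [if_neg h, show k.toNat = 0 by omega, List.take_zero]
  rw [hqs]
  have hrange : PySem.List.pyRange 0 k 1 = PySem.List.pyRange 0 (k.toNat : Int) 1 := by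
    by_cases h : 0 <= k
    · rw [show ((k.toNat : Int)) = k by omega]
    · rw [show ((k.toNat : Int)) = 0 by omega]
      simp [PySem.List.pyRange]
      omega
  rw [hrange, pv_fold_take queries k.toNat (by omega) _]
  have hsum : ∀ j : Nat, j < nums.length →
      (0 : Int) + (((queries.take k.toNat).foldl pvApplyQ
        (List.replicate (nums.length + 1) (0 : Int))).take (j + 1)).sum
        = pvCover (queries.take k.toNat) (0 + (j : Int)) := by
    intro j hj
    rw [pv_prefix_eq_cover nums.length (queries.take k.toNat)
      (List.replicate (nums.length + 1) (0 : Int)) (by simp) hq j hj]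
    simp [List.take_replicate, List.sum_replicate]
  exact pv_scan_eq (queries.take k.toNat) nums _ 0 0
    (by rw [pv_foldl_length, List.length_replicate]; omega) hsum
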